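-- pv_equiv track=rewrite | github.com/pypi-data/pypi-mirror-391 | packages/karma-medeval/karma_medeval-0.2.0.tar.gz/karma_medeval-0.2.0/karma/metrics/asr/lang/english_aligner.py | _generate_symbol_combinations
-- ===== SOURCE A (Python) =====
-- from typing import List, Set
-- from itertools import product
--
-- def _generate_symbol_combinations(symbols_info: List[tuple]) -> List[List[tuple]]:
--     """Generate all combinations of symbol word choices."""
--     if not symbols_info:
--         return []
--
--     # Extract word lists for each symbol
--     word_lists = []
--     for _, _, words in symbols_info:
--         # Filter out empty strings
--         non_empty_words = [w for w in words if w]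
--         if non_empty_words:
--             word_lists.append(non_empty_words)
--         else:
--             word_lists.append([''])  # Use empty string if no non-empty words
--
--     # Generate all combinations
--     combinations = []
--     for combo in product(*word_lists):
--         combo_with_info = []
--         for i, (pos, symbol, _) in enumerate(symbols_info):
--             combo_with_info.append((pos, symbol, combo[i]))
--         combinations.append(combo_with_info)
--
--     return combinations
-- ===== SOURCE B (Python) =====
-- def _generate_symbol_combinations(symbols_info):
--     """Generate all combinations of symbol word choices by mixed-radix index decoding."""
--     if not symbols_info:
--         return []
--     choices = []
--     total = 1
--     for pos, sym, words in symbols_info: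
--         ws = [w for w in words if w] or ['']
--         choices.append((pos, sym, ws))
--         total *= len(ws)
--     result = []
--     for k in range(total):
--         combo = []
--         rem = k
--         for pos, sym, ws in reversed(choices):
--             rem, d = divmod(rem, len(ws))
--             combo.append((pos, sym, ws[d]))
--         combo.reverse()
--         result.append(combo)
--     return result
-- ===== Notes on version B (the rewrite author's own statement) =====
-- stated objective: alternative
-- what changed: Replaced itertools.product enumeration plus indexed combo reconstruction by mixed-radix index decoding: the total count is computed, and each combination is rebuilt from its rank k via repeated divmod over reversed choice lists.
import Mathlib
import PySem

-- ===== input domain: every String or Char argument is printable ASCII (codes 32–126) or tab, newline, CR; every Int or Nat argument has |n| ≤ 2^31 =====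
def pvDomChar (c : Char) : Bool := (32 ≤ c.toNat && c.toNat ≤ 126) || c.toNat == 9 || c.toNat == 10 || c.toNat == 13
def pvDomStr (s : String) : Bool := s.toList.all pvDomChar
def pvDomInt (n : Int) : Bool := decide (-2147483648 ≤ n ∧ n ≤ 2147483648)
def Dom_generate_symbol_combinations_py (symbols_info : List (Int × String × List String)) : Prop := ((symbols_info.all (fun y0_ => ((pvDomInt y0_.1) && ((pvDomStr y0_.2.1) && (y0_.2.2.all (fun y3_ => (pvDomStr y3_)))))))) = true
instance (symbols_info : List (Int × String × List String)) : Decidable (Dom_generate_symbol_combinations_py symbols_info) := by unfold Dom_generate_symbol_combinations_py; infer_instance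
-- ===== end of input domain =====

-- B replaces itertools.product enumeration plus the indexed combo-reconstruction pass by
-- mixed-radix index decoding (each combination rebuilt from its rank k by repeated divmod);
-- objective: alternative (genuinely different algorithm, same cost).

-- ===== PORT A =====
-- word-list extraction loop ('non_empty_words' filter with [''] fallback)
def pvWordList (t : Int × String × List String) : List String :=
  let non_empty := t.2.2.filter (fun w => w ≠ "")
  if non_empty = [] then [""] else non_empty

-- itertools.product(*word_lists): odometer order, last list varies fastest
def pvProduct : List (List String) → List (List String)
  | [] => [[]]
  | l :: rest => l.flatMap (fun x => (pvProduct rest).map (fun c => x :: c))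

def generate_symbol_combinations_py (symbols_info : List (Int × String × List String)) : List (List (Int × String × String)) :=
  if symbols_info = [] then []
  else
    let word_lists := symbols_info.map pvWordList
    -- inner loop over enumerate(symbols_info) reading combo[i]; the index is always in
    -- range (|combo| = |symbols_info|), so the .getD "" default is never used
    (pvProduct word_lists).map (fun combo =>
      (PySem.List.enumerate symbols_info 0).map (fun ip =>
        (ip.2.1, ip.2.2.1, (PySem.List.pyGet? combo ip.1).getD "")))

-- ===== PORT B =====
def generate_symbol_combinations_py_alt (symbols_info : List (Int × String × List String)) : List (List (Int × String × String)) :=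
  if symbols_info = [] then []
  else
    -- first loop: build the tagged filtered choice lists and the running product 'total'
    let ct := symbols_info.foldl (fun (acc : List (Int × String × List String) × Int) t =>
      let ws := (fun ne => if ne = [] then [""] else ne) (t.2.2.filter (fun w => w ≠ ""))
      (acc.1 ++ [(t.1, t.2.1, ws)], acc.2 * (ws.length : Int))) ([], 1)
    -- second loop: for k in range(total), decode rank k over reversed(choices) by divmod;
    -- each ws has length ≥ 1, so divmod? is always some and the index d is in range
    (PySem.List.pyRange 0 ct.2 1).map (fun k =>
      ((ct.1.reverse.foldl (fun (st : Int × List (Int × String × String)) c =>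
          let rd := (PySem.Int.divmod? st.1 (c.2.2.length : Int)).getD (0, 0)
          (rd.1, st.2 ++ [(c.1, c.2.1, (PySem.List.pyGet? c.2.2 rd.2).getD "")])) (k, [])).2).reverse)

-- ===== PRECONDITION & SPEC =====
def Spec_generate_symbol_combinations_py (symbols_info : List (Int × String × List String)) (out : List (List (Int × String × String))) : Prop := out = generate_symbol_combinations_py_alt symbols_info
instance (symbols_info : List (Int × String × List String)) (out : List (List (Int × String × String))) : Decidable (Spec_generate_symbol_combinations_py symbols_info out) := by unfold Spec_generate_symbol_combinations_py; infer_instance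

-- ===== CLAIM (what is proved, stated in full; the proofs are below) =====
def Claim_equal_generate_symbol_combinations_py : Prop := ∀ (symbols_info : List (Int × String × List String)), Dom_generate_symbol_combinations_py symbols_info → Spec_generate_symbol_combinations_py symbols_info (generate_symbol_combinations_py symbols_info)

-- ===== LEMMAS AND PROOFS =====

-- recursive product characterization (tagged form, shared by both directions)
def pvTag (t : Int × String × List String) : Int × String × List String :=
  (t.1, t.2.1, pvWordList t)

def pvM (cs : List (Int × String × List String)) : Nat :=
  (cs.map (fun c => c.2.2.length)).prod

def pvGT : List (Int × String × List String) → List (List (Int × String × String))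
  | [] => [[]]
  | c :: rest => c.2.2.flatMap (fun w => (pvGT rest).map (fun cb => (c.1, c.2.1, w) :: cb))

-- mixed-radix decoding of rank k (head most significant)
def pvD : List (Int × String × List String) → Nat → List (Int × String × String)
  | [], _ => []
  | c :: rest, k => (c.1, c.2.1, (c.2.2[(k / pvM rest) % c.2.2.length]?).getD "") :: pvD rest k

theorem pvM_pos {cs : List (Int × String × List String)}
    (h : ∀ c ∈ cs, c.2.2 ≠ []) : 0 < pvM cs := by
  induction cs with
  | nil => simp [pvM]
  | cons c rest ih =>
    have h1 : c.2.2 ≠ [] := h c (by simp)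
    have h2 : 0 < pvM rest := ih (fun x hx => h x (by simp [hx]))
    have : 0 < c.2.2.length := List.length_pos_iff.mpr h1
    simpa [pvM] using Nat.mul_pos this h2

-- A-side reduction to pvGT -----------------------------------------------------

theorem pvProduct_length {ls : List (List String)} {c : List String}
    (h : c ∈ pvProduct ls) : c.length = ls.length := by
  induction ls generalizing c with
  | nil => simp [pvProduct] at h; simp [h]
  | cons l rest ih =>
    simp only [pvProduct, List.mem_flatMap, List.mem_map] at h
    obtain ⟨x, _, c', hc', rfl⟩ := h
    simp [ih hc']

theorem pvEnum_eq_zipWith (si : List (Int × String × List String)) (combo : List String)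
    (h : combo.length = si.length) :
    (PySem.List.enumerate si 0).map (fun ip =>
        (ip.2.1, ip.2.2.1, (PySem.List.pyGet? combo ip.1).getD ""))
      = List.zipWith (fun t w => (t.1, t.2.1, w)) si combo := by
  apply List.ext_getElem
  · simp [PySem.List.length_enumerate, h]
  · intro j hj1 hj2
    simp only [List.getElem_map, PySem.List.getElem_enumerate, List.getElem_zipWith]
    have hlt : j < combo.length := by
      simp [PySem.List.length_enumerate] at hj1; omega
    simp [PySem.List.pyGet?, PySem.List.pyIdx?, hlt]

theorem pvProduct_map_zipWith (si : List (Int × String × List String)) :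
    (pvProduct (si.map pvWordList)).map (List.zipWith (fun t w => (t.1, t.2.1, w)) si)
      = pvGT (si.map pvTag) := by
  induction si with
  | nil => simp [pvProduct, pvGT]
  | cons t rest ih =>
    simp only [List.map_cons, pvProduct, pvGT, pvTag, List.map_flatMap, List.map_map]
    refine List.flatMap_congr ?_
    intro w _
    rw [← ih, List.map_map]
    rfl

-- B-side: the two folds -------------------------------------------------------

theorem pvCT_eq (si : List (Int × String × List String))
    (acc : List (Int × String × List String)) (p : Int) :
    si.foldl (fun (acc : List (Int × String × List String) × Int) t =>
      let ws := (fun ne => if ne = [] then [""] else ne) (t.2.2.filter (fun w => w ≠ ""))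
      (acc.1 ++ [(t.1, t.2.1, ws)], acc.2 * (ws.length : Int))) (acc, p)
      = (acc ++ si.map pvTag, p * (pvM (si.map pvTag) : Int)) := by
  induction si generalizing acc p with
  | nil => simp [pvM]
  | cons t rest ih =>
    simp only [List.foldl_cons, List.map_cons]
    rw [ih]
    simp [pvTag, pvWordList, pvM, mul_assoc]

theorem pvDivmodNat (m n : Nat) (hn : n ≠ 0) :
    PySem.Int.divmod? (m : Int) (n : Int) = some (((m / n : Nat) : Int), ((m % n : Nat) : Int)) := by
  have hb : (n : Int) ≠ 0 := by exact_mod_cast hn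
  have h1 : ((m : Int)).fdiv (n : Int) = ((m / n : Nat) : Int) := by
    cases m with
    | zero => simp [Nat.zero_div, Int.fdiv]
    | succ m => rfl
  have h2 : ((m : Int)).fmod (n : Int) = ((m % n : Nat) : Int) := by
    cases m with
    | zero => simp [Nat.zero_mod, Int.fmod]
    | succ m => rfl
  simp [PySem.Int.divmod?, h1, h2, hn]

theorem pvDecode_foldr (cs : List (Int × String × List String))
    (h : ∀ c ∈ cs, c.2.2 ≠ []) (k : Nat) (acc : List (Int × String × String)) :
    cs.foldr (fun c st =>
        let rd := (PySem.Int.divmod? st.1 (c.2.2.length : Int)).getD (0, 0)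
        (rd.1, st.2 ++ [(c.1, c.2.1, (PySem.List.pyGet? c.2.2 rd.2).getD "")]))
      ((k : Int), acc)
      = (((k / pvM cs : Nat) : Int), acc ++ (pvD cs k).reverse) := by
  induction cs generalizing acc with
  | nil => simp [pvM, pvD]
  | cons c rest ih =>
    have hc : c.2.2 ≠ [] := h c (by simp)
    have hlen : c.2.2.length ≠ 0 := by simpa using hc
    simp only [List.foldr_cons]
    rw [ih (fun x hx => h x (by simp [hx]))]
    rw [pvDivmodNat (k / pvM rest) c.2.2.length hlen]
    have hidx : (PySem.List.pyGet? c.2.2 ((k / pvM rest % c.2.2.length : Nat) : Int)).getD ""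
        = (c.2.2[(k / pvM rest) % c.2.2.length]?).getD "" := by
      rw [PySem.List.pyGet?_natCast]
    simp only [Option.getD_some]
    rw [hidx]
    have hq : k / pvM rest / c.2.2.length = k / pvM (c :: rest) := by
      rw [Nat.div_div_eq_div_mul]
      simp [pvM, Nat.mul_comm]
    simp only [Prod.mk.injEq]
    refine ⟨by rw [hq], ?_⟩
    simp [pvD, List.append_assoc]

-- periodicity: the decoding of rank i * pvM cs + j equals the decoding of j
theorem pvD_period (cs : List (Int × String × List String)) (i j : Nat) :
    pvD cs (i * pvM cs + j) = pvD cs j := by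
  induction cs generalizing i with
  | nil => simp [pvD]
  | cons c rest ih =>
    simp only [pvD]
    have hk : i * pvM (c :: rest) + j = (i * c.2.2.length) * pvM rest + j := by
      simp [pvM]; ring
    have hidxeq : (i * pvM (c :: rest) + j) / pvM rest % c.2.2.length
        = j / pvM rest % c.2.2.length := by
      rcases Nat.eq_zero_or_pos (pvM rest) with h0 | hpos
      · simp [h0]
      · rw [hk, Nat.mul_comm (i * c.2.2.length) (pvM rest), Nat.mul_add_div hpos,
          Nat.add_comm, Nat.add_mul_mod_self_right]
    rw [hidxeq, hk, ih (i * c.2.2.length)]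

-- range decomposition: range (a * m) in odometer blocks
theorem pvRange_mul (a m : Nat) :
    List.range (a * m) = (List.range a).flatMap (fun i => (List.range m).map (fun j => i * m + j)) := by
  induction a with
  | zero => simp
  | succ a ih =>
    have : (a + 1) * m = a * m + m := by ring
    rw [this, List.range_add, ih, List.range_succ]
    simp [List.flatMap_append]

-- the enumeration of all ranks decodes to the full product
theorem pvD_enum (cs : List (Int × String × List String))
    (h : ∀ c ∈ cs, c.2.2 ≠ []) :
    (List.range (pvM cs)).map (pvD cs) = pvGT cs := by
  induction cs with
  | nil => simp [pvM, pvD, pvGT]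
  | cons c rest ih =>
    have hc : c.2.2 ≠ [] := h c (by simp)
    have hlen : 0 < c.2.2.length := List.length_pos_iff.mpr hc
    have hrest : ∀ x ∈ rest, x.2.2 ≠ [] := fun x hx => h x (by simp [hx])
    have hMr : 0 < pvM rest := pvM_pos hrest
    have hM : pvM (c :: rest) = c.2.2.length * pvM rest := by simp [pvM]
    rw [hM, pvRange_mul, List.map_flatMap]
    have hblock : ∀ i < c.2.2.length,
        ((List.range (pvM rest)).map (fun j => i * pvM rest + j)).map (pvD (c :: rest))
          = (pvGT rest).map (fun cb => (c.1, c.2.1, (c.2.2[i]?).getD "") :: cb) := by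
      intro i hi
      rw [List.map_map, ← ih hrest, List.map_map]
      refine List.map_congr_left ?_
      intro j hj
      have hjlt : j < pvM rest := List.mem_range.mp hj
      simp only [Function.comp]
      show pvD (c :: rest) (i * pvM rest + j) = _
      simp only [pvD]
      have hdig : (i * pvM rest + j) / pvM rest = i := by
        rw [Nat.mul_comm i (pvM rest), Nat.mul_add_div hMr, Nat.div_eq_of_lt hjlt]
        omega
      have hper : pvD rest (i * pvM rest + j) = pvD rest j := pvD_period rest i j
      rw [hdig, Nat.mod_eq_of_lt hi, hper]
    have : c.2.2.flatMap (fun w => (pvGT rest).map (fun cb => (c.1, c.2.1, w) :: cb))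
        = (List.range c.2.2.length).flatMap (fun i =>
            (pvGT rest).map (fun cb => (c.1, c.2.1, (c.2.2[i]?).getD "") :: cb)) := by
      conv_lhs => rw [show c.2.2 = (List.range c.2.2.length).map (fun i => (c.2.2[i]?).getD "") by
        apply List.ext_getElem
        · simp
        · intro i h1 h2
          simp [List.getElem?_eq_getElem h1]]
      rw [List.flatMap_map]
    rw [pvGT, this]
    refine List.flatMap_congr ?_
    intro i hi
    exact hblock i (List.mem_range.mp hi)

theorem pvTag_ne (t : Int × String × List String) : (pvTag t).2.2 ≠ [] := by
  simp only [pvTag, pvWordList]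
  split <;> simp_all

-- ===== VERDICT (by name: the statement is the Claim_ definition above) =====
theorem generate_symbol_combinations_py_spec : Claim_equal_generate_symbol_combinations_py := by
  intro si _
  unfold Spec_generate_symbol_combinations_py generate_symbol_combinations_py generate_symbol_combinations_py_alt
  by_cases h : si = []
  · simp [h]
  · simp only [h, ite_false]
    have htag : ∀ c ∈ si.map pvTag, c.2.2 ≠ [] := by
      intro c hc
      obtain ⟨t, _, rfl⟩ := List.mem_map.mp hc
      exact pvTag_ne t
    -- reduce A to pvGT
    have hA : (pvProduct (si.map pvWordList)).map (fun combo =>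
        (PySem.List.enumerate si 0).map (fun ip =>
          (ip.2.1, ip.2.2.1, (PySem.List.pyGet? combo ip.1).getD "")))
        = pvGT (si.map pvTag) := by
      rw [← pvProduct_map_zipWith]
      refine List.map_congr_left ?_
      intro c hc
      exact pvEnum_eq_zipWith si c (by simpa using pvProduct_length hc)
    rw [hA]
    -- reduce B to pvGT
    rw [pvCT_eq si [] 1]
    simp only [List.nil_append, one_mul]
    rw [PySem.List.pyRange_one 0 ((pvM (si.map pvTag) : Nat) : Int)]
    simp only [Int.sub_zero, Int.toNat_natCast, List.map_map]
    refine Eq.symm ?_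
    rw [← pvD_enum (si.map pvTag) htag]
    refine List.map_congr_left ?_
    intro k _
    simp only [Function.comp]
    rw [List.foldl_reverse]
    have := pvDecode_foldr (si.map pvTag) htag k []
    simp only [List.nil_append] at this
    show ((List.foldr _ ((0 + (k : Int)), []) (si.map pvTag)).2).reverse = pvD (si.map pvTag) k
    rw [show (0 + (k : Int)) = (k : Int) by ring, this]
    simp
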